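-- pv_equiv track=rewrite | github.com/adwuard/xSynth-go | software/sysex_to_xfm2/sysex_reader.py | operator_breakpoin
-- ===== SOURCE A (Python) =====
-- NOTES = ["C", "C#", "D", "D#", "E", "F", "F#", "G", "G#", "A", "A#", "B"]
--
-- def operator_breakpoin(breakpoint_number):
-- 	# C3 = 27
-- 	note_name = NOTES[(breakpoint_number + 9) % 12]
-- 	breakpoint = 3
-- 	for octave in range(-1,8):
-- 		if breakpoint_number < breakpoint:
-- 			return "{}{}".format(note_name, octave)
-- 		breakpoint += 12
-- 	return "Unknown"
-- ===== SOURCE B (Python) =====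
-- NOTES = ["C", "C#", "D", "D#", "E", "F", "F#", "G", "G#", "A", "A#", "B"]
--
-- def operator_breakpoin(breakpoint_number):
-- 	# closed-form octave instead of the threshold-incrementing scan (simpler)
-- 	note_name = NOTES[(breakpoint_number + 9) % 12]
-- 	if breakpoint_number >= 99:
-- 		return "Unknown"
-- 	octave = max((breakpoint_number - 3) // 12, -1)
-- 	return "{}{}".format(note_name, octave)
-- ===== Notes on version B (the rewrite author's own statement) =====
-- stated objective: simpler
-- what changed: Replaced the range(-1,8) loop with an incrementing threshold by a single floor-division closed form (octave = max((n-3)//12, -1), 'Unknown' for n >= 99).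
import Mathlib
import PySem

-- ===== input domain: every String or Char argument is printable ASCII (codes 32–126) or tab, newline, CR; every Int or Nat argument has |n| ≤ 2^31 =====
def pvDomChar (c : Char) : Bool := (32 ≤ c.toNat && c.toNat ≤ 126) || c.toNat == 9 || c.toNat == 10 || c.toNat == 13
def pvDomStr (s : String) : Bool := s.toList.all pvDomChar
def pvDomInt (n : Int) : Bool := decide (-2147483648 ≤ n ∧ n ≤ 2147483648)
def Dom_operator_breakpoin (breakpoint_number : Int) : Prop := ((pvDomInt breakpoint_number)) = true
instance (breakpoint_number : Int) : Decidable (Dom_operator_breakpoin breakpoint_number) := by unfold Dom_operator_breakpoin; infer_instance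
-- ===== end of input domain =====

-- B replaces A's threshold-incrementing octave loop by a floor-division closed form (simpler, same values).

-- ===== PORT A =====
def pvNOTES : List String := ["C", "C#", "D", "D#", "E", "F", "F#", "G", "G#", "A", "A#", "B"]

-- the 'for octave in range(-1,8)' loop with the mutable 'breakpoint' threshold and early return
def pvLoopA : List Int → Int → String → Int → String
  | [], _, _, _ => "Unknown"
  | octave :: rest, n, note_name, breakpoint =>
      if n < breakpoint then note_name ++ PySem.Int.toStr octave
      else pvLoopA rest n note_name (breakpoint + 12)

def operator_breakpoin (breakpoint_number : Int) : String :=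
  let note_name := (PySem.List.pyGet? pvNOTES (PySem.Int.mod (breakpoint_number + 9) 12)).getD ""
  pvLoopA (PySem.List.pyRange (-1) 8 1) breakpoint_number note_name 3

-- ===== PORT B =====
def operator_breakpoin_alt (breakpoint_number : Int) : String :=
  let note_name := (PySem.List.pyGet? pvNOTES (PySem.Int.mod (breakpoint_number + 9) 12)).getD ""
  if 99 ≤ breakpoint_number then "Unknown"
  else note_name ++ PySem.Int.toStr (max (PySem.Int.floordiv (breakpoint_number - 3) 12) (-1))

-- ===== PRECONDITION & SPEC =====
def Spec_operator_breakpoin (breakpoint_number : Int) (out : String) : Prop := out = operator_breakpoin_alt breakpoint_number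
instance (breakpoint_number : Int) (out : String) : Decidable (Spec_operator_breakpoin breakpoint_number out) := by unfold Spec_operator_breakpoin; infer_instance

-- ===== CLAIM (what is proved, stated in full; the proofs are below) =====
def Claim_equal_operator_breakpoin : Prop := ∀ (breakpoint_number : Int), Dom_operator_breakpoin breakpoint_number → Spec_operator_breakpoin breakpoint_number (operator_breakpoin breakpoint_number)

-- ===== LEMMAS AND PROOFS =====

theorem pvRange_eval : PySem.List.pyRange (-1) 8 1 = [-1, 0, 1, 2, 3, 4, 5, 6, 7] := by decide

-- closed form of B's octave on the band where A's loop stops at `octave`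
theorem pvOct_eq (n octave : Int) (hlo : n < 3 + 12 * (octave + 1)) (hhi : -1 ≤ octave)
    (hband : octave = -1 ∨ 3 + 12 * octave ≤ n) :
    max (PySem.Int.floordiv (n - 3) 12) (-1) = octave := by
  rcases hband with h | h
  · subst h
    have : PySem.Int.floordiv (n - 3) 12 ≤ -1 := by
      rw [PySem.Int.floordiv_eq_ediv_of_pos (by omega)]
      omega
    omega
  · have : PySem.Int.floordiv (n - 3) 12 = octave := by
      rw [PySem.Int.floordiv_eq_ediv_of_pos (by omega)]
      omega
    omega

theorem operator_breakpoin_eq (n : Int) : operator_breakpoin n = operator_breakpoin_alt n := by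
  unfold operator_breakpoin operator_breakpoin_alt
  rw [pvRange_eval]
  by_cases h99 : 99 ≤ n
  · simp only [pvLoopA, if_neg (by omega : ¬ n < 3), if_neg (by omega : ¬ n < 3 + 12),
      if_neg (by omega : ¬ n < 3 + 12 + 12), if_neg (by omega : ¬ n < 3 + 12 + 12 + 12),
      if_neg (by omega : ¬ n < 3 + 12 + 12 + 12 + 12),
      if_neg (by omega : ¬ n < 3 + 12 + 12 + 12 + 12 + 12),
      if_neg (by omega : ¬ n < 3 + 12 + 12 + 12 + 12 + 12 + 12),
      if_neg (by omega : ¬ n < 3 + 12 + 12 + 12 + 12 + 12 + 12 + 12),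
      if_neg (by omega : ¬ n < 3 + 12 + 12 + 12 + 12 + 12 + 12 + 12 + 12), if_pos h99]
  · rw [if_neg h99]
    -- find the octave where A's loop stops and rewrite B's closed form to it
    by_cases h0 : n < 3
    · simp only [pvLoopA, if_pos h0, pvOct_eq n (-1) (by omega) (by omega) (Or.inl rfl)]
    by_cases h1 : n < 15
    · simp only [pvLoopA, if_neg h0, if_pos (by omega : n < 3 + 12),
        pvOct_eq n 0 (by omega) (by omega) (Or.inr (by omega))]
    by_cases h2 : n < 27
    · simp only [pvLoopA, if_neg h0, if_neg (by omega : ¬ n < 3 + 12),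
        if_pos (by omega : n < 3 + 12 + 12), pvOct_eq n 1 (by omega) (by omega) (Or.inr (by omega))]
    by_cases h3 : n < 39
    · simp only [pvLoopA, if_neg h0, if_neg (by omega : ¬ n < 3 + 12),
        if_neg (by omega : ¬ n < 3 + 12 + 12), if_pos (by omega : n < 3 + 12 + 12 + 12),
        pvOct_eq n 2 (by omega) (by omega) (Or.inr (by omega))]
    by_cases h4 : n < 51
    · simp only [pvLoopA, if_neg h0, if_neg (by omega : ¬ n < 3 + 12),
        if_neg (by omega : ¬ n < 3 + 12 + 12), if_neg (by omega : ¬ n < 3 + 12 + 12 + 12),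
        if_pos (by omega : n < 3 + 12 + 12 + 12 + 12),
        pvOct_eq n 3 (by omega) (by omega) (Or.inr (by omega))]
    by_cases h5 : n < 63
    · simp only [pvLoopA, if_neg h0, if_neg (by omega : ¬ n < 3 + 12),
        if_neg (by omega : ¬ n < 3 + 12 + 12), if_neg (by omega : ¬ n < 3 + 12 + 12 + 12),
        if_neg (by omega : ¬ n < 3 + 12 + 12 + 12 + 12),
        if_pos (by omega : n < 3 + 12 + 12 + 12 + 12 + 12),
        pvOct_eq n 4 (by omega) (by omega) (Or.inr (by omega))]
    by_cases h6 : n < 75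
    · simp only [pvLoopA, if_neg h0, if_neg (by omega : ¬ n < 3 + 12),
        if_neg (by omega : ¬ n < 3 + 12 + 12), if_neg (by omega : ¬ n < 3 + 12 + 12 + 12),
        if_neg (by omega : ¬ n < 3 + 12 + 12 + 12 + 12),
        if_neg (by omega : ¬ n < 3 + 12 + 12 + 12 + 12 + 12),
        if_pos (by omega : n < 3 + 12 + 12 + 12 + 12 + 12 + 12),
        pvOct_eq n 5 (by omega) (by omega) (Or.inr (by omega))]
    by_cases h7 : n < 87
    · simp only [pvLoopA, if_neg h0, if_neg (by omega : ¬ n < 3 + 12),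
        if_neg (by omega : ¬ n < 3 + 12 + 12), if_neg (by omega : ¬ n < 3 + 12 + 12 + 12),
        if_neg (by omega : ¬ n < 3 + 12 + 12 + 12 + 12),
        if_neg (by omega : ¬ n < 3 + 12 + 12 + 12 + 12 + 12),
        if_neg (by omega : ¬ n < 3 + 12 + 12 + 12 + 12 + 12 + 12),
        if_pos (by omega : n < 3 + 12 + 12 + 12 + 12 + 12 + 12 + 12),
        pvOct_eq n 6 (by omega) (by omega) (Or.inr (by omega))]
    · simp only [pvLoopA, if_neg h0, if_neg (by omega : ¬ n < 3 + 12),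
        if_neg (by omega : ¬ n < 3 + 12 + 12), if_neg (by omega : ¬ n < 3 + 12 + 12 + 12),
        if_neg (by omega : ¬ n < 3 + 12 + 12 + 12 + 12),
        if_neg (by omega : ¬ n < 3 + 12 + 12 + 12 + 12 + 12),
        if_neg (by omega : ¬ n < 3 + 12 + 12 + 12 + 12 + 12 + 12),
        if_neg (by omega : ¬ n < 3 + 12 + 12 + 12 + 12 + 12 + 12 + 12),
        if_pos (by omega : n < 3 + 12 + 12 + 12 + 12 + 12 + 12 + 12 + 12),
        pvOct_eq n 7 (by omega) (by omega) (Or.inr (by omega))]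

-- ===== VERDICT (by name: the statement is the Claim_ definition above) =====
theorem operator_breakpoin_spec : Claim_equal_operator_breakpoin := by
  intro n _
  exact operator_breakpoin_eq n
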